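-- pv_equiv track=rewrite | github.com/Nokmer/Project | Ближайший ноль.py | recalculation
-- ===== SOURCE A (Python) =====
-- def recalculation(array: list) -> list:
--
--     ranking = None
--     array_2 = []
--
--     for i in array:
--         if i == 0:
--             ranking = 0
--
--         array_2.append(ranking)
--
--         if ranking is not None:
--             ranking += 1
--
--     return array_2
-- ===== SOURCE B (Python) =====
-- def recalculation(array: list) -> list:
--     # Stage 1: collect the positions of all zeros; Stage 2: emit None for the
--     # prefix before the first zero, then one counted-up range per zero segment.
--     zs = [i for i, x in enumerate(array) if x == 0]
--     if not zs:
--         return [None] * len(array)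
--     out = [None] * zs[0]
--     bounds = zs + [len(array)]
--     for a, b in zip(bounds, bounds[1:]):
--         out.extend(range(b - a))
--     return out
-- ===== Notes on version B (the rewrite author's own statement) =====
-- stated objective: alternative
-- what changed: B is a staged algorithm: it first collects the zero positions, then assembles the output from a None-prefix plus one range(gap) block per segment between consecutive zeros, instead of A's single pass threading a per-element counter.
import Mathlib
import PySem

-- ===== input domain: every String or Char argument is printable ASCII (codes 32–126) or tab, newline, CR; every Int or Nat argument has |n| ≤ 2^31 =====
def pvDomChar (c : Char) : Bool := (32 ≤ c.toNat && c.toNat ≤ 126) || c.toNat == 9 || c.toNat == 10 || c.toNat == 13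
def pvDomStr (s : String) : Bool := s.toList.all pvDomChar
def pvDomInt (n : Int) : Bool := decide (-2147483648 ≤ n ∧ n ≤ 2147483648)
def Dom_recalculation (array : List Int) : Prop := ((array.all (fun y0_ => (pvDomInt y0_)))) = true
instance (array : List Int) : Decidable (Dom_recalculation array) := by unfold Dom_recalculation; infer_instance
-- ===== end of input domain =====

-- B replaces A's single counter-threading pass by a staged algorithm: collect the zero positions, then build the output as a None-prefix plus one range block per zero segment; objective: alternative decomposition, same O(n) cost.


-- ===== PORT A =====
-- A: one pass threading counter 'ranking' (reset to 0 on zeros, incremented after each append).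
def recGoA : List Int → Option Int → List (Option Int) → List (Option Int)
  | [], _, acc => acc
  | x :: xs, r, acc =>
    let r1 := if x = 0 then some 0 else r
    let acc' := acc ++ [r1]
    let r2 := match r1 with
      | some k => some (k + 1)
      | none => none
    recGoA xs r2 acc'

def recalculation (array : List Int) : List (Option Int) :=
  recGoA array none []

-- ===== PORT B =====
-- B stage 1: '[i for i, x in enumerate(array) if x == 0]' (the enumerate index threaded explicitly).
def zsFrom : Int → List Int → List Int
  | _, [] => []
  | i, x :: xs => if x = 0 then i :: zsFrom (i + 1) xs else zsFrom (i + 1) xs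

-- B stage 2: None-prefix, then extend with range(b - a) for consecutive bounds.
def recalculation_alt (array : List Int) : List (Option Int) :=
  let zs := zsFrom 0 array
  match zs with
  | [] => List.replicate array.length none
  | z0 :: _ =>
    let bounds := zs ++ [(array.length : Int)]
    (bounds.zip bounds.tail).foldl
      (fun out p => out ++ (PySem.List.pyRange 0 (p.2 - p.1) 1).map some)
      (List.replicate z0.toNat none)

-- ===== PRECONDITION & SPEC =====
def Spec_recalculation (array : List Int) (out : List (Option Int)) : Prop := out = recalculation_alt array
instance (array : List Int) (out : List (Option Int)) : Decidable (Spec_recalculation array out) := by unfold Spec_recalculation; infer_instance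

-- ===== CLAIM (what is proved, stated in full; the proofs are below) =====
def Claim_equal_recalculation : Prop := ∀ (array : List Int), Dom_recalculation array → Spec_recalculation array (recalculation array)

-- ===== LEMMAS AND PROOFS =====

-- A without the accumulator.
def fA : List Int → Option Int → List (Option Int)
  | [], _ => []
  | x :: xs, r =>
    let r1 := if x = 0 then some 0 else r
    r1 :: fA xs (match r1 with | some k => some (k + 1) | none => none)

theorem recGoA_eq (xs : List Int) : ∀ (r : Option Int) (acc : List (Option Int)),
    recGoA xs r acc = acc ++ fA xs r := by
  induction xs with
  | nil => intro r acc; simp [recGoA, fA]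
  | cons x xs ih => intro r acc; simp [recGoA, fA, ih]

-- one segment of B\'s output
def seg (p : Int × Int) : List (Option Int) := (PySem.List.pyRange 0 (p.2 - p.1) 1).map some

-- consecutive pairs
def pairs : Int → List Int → Int → List (Int × Int)
  | z, [], n => [(z, n)]
  | z, w :: l, n => (z, w) :: pairs w l n

theorem zip_tail_eq_pairs (l : List Int) : ∀ (z0 n : Int),
    ((z0 :: l ++ [n]).zip ((z0 :: l ++ [n]).tail)) = pairs z0 l n := by
  induction l with
  | nil => intro z0 n; simp [pairs]
  | cons w l ih => intro z0 n; simp only [List.cons_append, List.zip_cons_cons, List.tail_cons, pairs]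
                   exact congrArg _ (ih w n)

theorem foldl_extend (l : List (Int × Int)) : ∀ (init : List (Option Int)),
    l.foldl (fun out p => out ++ (PySem.List.pyRange 0 (p.2 - p.1) 1).map some) init
      = init ++ l.flatMap seg := by
  induction l with
  | nil => intro init; simp
  | cons p l ih => intro init; simp [List.foldl_cons, ih, List.flatMap_cons, seg]

theorem zsFrom_head_ge : ∀ (q : List Int) (i z0 : Int) (rest : List Int),
    zsFrom i q = z0 :: rest → i ≤ z0 := by
  intro q
  induction q with
  | nil => intro i z0 rest h; simp [zsFrom] at h
  | cons x xs ih =>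
    intro i z0 rest h
    by_cases hx : x = 0
    · simp [zsFrom, hx] at h; omega
    · simp [zsFrom, hx] at h; have := ih (i + 1) z0 rest h; omega

theorem map_some_range_succ (c : Int) (hc : 0 ≤ c) :
    (PySem.List.pyRange 0 (c + 1) 1).map (some : Int → Option Int)
      = (PySem.List.pyRange 0 c 1).map some ++ [some c] := by
  rw [PySem.List.pyRange_one_succ_right (by omega)]
  simp

-- main segment lemma: after a zero at absolute index z, with c positions already past it
theorem segLemma : ∀ (q : List Int) (z c : Int), 0 ≤ c →
    ((PySem.List.pyRange 0 c 1).map some) ++ fA q (some c)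
      = (pairs z (zsFrom (z + c) q) (z + c + q.length)).flatMap seg := by
  intro q
  induction q with
  | nil =>
    intro z c hc
    simp [zsFrom, pairs, fA, seg, List.flatMap_cons]
  | cons x xs ih =>
    intro z c hc
    by_cases hx : x = 0
    · have h1 : zsFrom (z + c) (x :: xs) = (z + c) :: zsFrom (z + c + 1) xs := by
        simp [zsFrom, hx]
      rw [h1]
      simp only [pairs, List.flatMap_cons]
      have h2 := ih (z + c) 1 (by omega)
      have h3 : z + c + 1 + (xs.length : Int) = z + c + (x :: xs).length := by
        simp; omega
      rw [h3] at h2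
      rw [← h2]
      have hseg : seg (z, z + c) = (PySem.List.pyRange 0 c 1).map some := by
        simp [seg]
      rw [hseg]
      simp [fA, hx, PySem.List.pyRange_one_cons (by omega : (0:Int) < 1)]
    · have h1 : zsFrom (z + c) (x :: xs) = zsFrom (z + c + 1) xs := by
        simp [zsFrom, hx]
      rw [h1]
      rw [show z + c + ((x :: xs).length : Int) = z + (c + 1) + (xs.length : Int) by simp; omega]
      have h2 := ih z (c + 1) (by omega)
      rw [show z + (c + 1) = z + c + 1 from by omega] at h2 ⊢
      rw [← h2, map_some_range_succ c hc]
      simp [fA, hx]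

-- B\'s staged result, as a function of the zero list
def buildB (zs : List Int) (i n : Int) (len : Nat) : List (Option Int) :=
  match zs with
  | [] => List.replicate len none
  | z0 :: rest => List.replicate (z0 - i).toNat none ++ (pairs z0 rest (i + n)).flatMap seg

-- top level: fA with counter none equals B\'s staged construction
theorem topLemma : ∀ (array : List Int) (i : Int),
    fA array none = buildB (zsFrom i array) i array.length array.length := by
  intro array
  induction array with
  | nil => intro i; simp [zsFrom, fA, buildB]
  | cons x xs ih =>
    intro i
    by_cases hx : x = 0
    · have h1 : zsFrom i (x :: xs) = i :: zsFrom (i + 1) xs := by simp [zsFrom, hx]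
      rw [h1]
      have h2 := segLemma xs i 1 (by omega)
      have h3 : i + 1 + (xs.length : Int) = i + (x :: xs).length := by simp; omega
      rw [h3] at h2
      have hfa : fA (x :: xs) none = some 0 :: fA xs (some 1) := by simp [fA, hx]
      rw [hfa, buildB, ← h2]
      simp [PySem.List.pyRange_one_cons (by omega : (0:Int) < 1)]
    · have h1 : zsFrom i (x :: xs) = zsFrom (i + 1) xs := by simp [zsFrom, hx]
      have hfa : fA (x :: xs) none = none :: fA xs none := by simp [fA, hx]
      rw [h1, hfa, ih (i + 1)]
      cases hz : zsFrom (i + 1) xs with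
      | nil => simp [buildB, List.replicate_succ]
      | cons z0 rest =>
        have hge := zsFrom_head_ge xs (i + 1) z0 rest hz
        have hrep : (z0 - i).toNat = (z0 - (i + 1)).toNat + 1 := by omega
        have h4 : i + 1 + (xs.length : Int) = i + (x :: xs).length := by simp; omega
        simp only [buildB, hrep, h4, List.replicate_succ, List.cons_append]

-- ===== VERDICT (by name: the statement is the Claim_ definition above) =====
theorem recalculation_spec : Claim_equal_recalculation := by
  intro array _
  unfold Spec_recalculation
  have hA : recalculation array = fA array none := by
    simpa using recGoA_eq array none []
  unfold recalculation_alt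
  rw [hA, topLemma array 0]
  cases hz : zsFrom 0 array with
  | nil => simp [buildB]
  | cons z0 rest =>
    simp only [buildB]
    rw [zip_tail_eq_pairs rest z0 (array.length : Int), foldl_extend,
      show z0 - 0 = z0 from by omega, show (0:Int) + array.length = (array.length:Int) from by omega]
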